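-- pv_equiv track=rewrite | github.com/TPay-JennelleMaier/AdventOfCode2025 | Day2_Puzzle2/advent_puzzle.py | is_multipled
-- ===== SOURCE A (Python) =====
-- def is_multipled(text):
-- 	length = len(text)
-- 	divisor = 2
-- 	while divisor <= length:
-- 		if length%divisor == 0:
-- 			index = int(length/divisor)
-- 			unit = text[:index]
-- 			if text == (str(unit) * divisor):
-- 				return True
-- 		divisor = divisor + 1
-- 	return False
-- ===== SOURCE B (Python) =====
-- def is_multipled(text):
--     # A string is a smaller unit repeated iff it occurs in its own doubling
--     # with the first and last characters removed (classic rotation trick).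
--     return len(text) > 0 and text in (text + text)[1:-1]
-- ===== Notes on version B (the rewrite author's own statement) =====
-- stated objective: faster
-- what changed: Replaced the divisor-enumerating loop that rebuilds and compares a candidate repetition for every divisor with the single substring test text in (text+text)[1:-1], guarded by len(text) > 0.
import Mathlib
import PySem

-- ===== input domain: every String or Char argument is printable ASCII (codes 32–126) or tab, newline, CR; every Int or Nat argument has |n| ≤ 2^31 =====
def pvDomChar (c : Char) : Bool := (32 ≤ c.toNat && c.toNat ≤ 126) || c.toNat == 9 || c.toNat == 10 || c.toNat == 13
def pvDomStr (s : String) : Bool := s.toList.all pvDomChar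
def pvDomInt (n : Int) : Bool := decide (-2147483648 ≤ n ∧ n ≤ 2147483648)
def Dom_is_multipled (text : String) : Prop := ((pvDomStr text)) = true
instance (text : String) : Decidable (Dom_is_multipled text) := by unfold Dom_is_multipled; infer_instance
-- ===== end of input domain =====

-- B replaces A's divisor-enumerating loop by the single substring test
-- `text in (text+text)[1:-1]` (guarded by non-emptiness): a faster algorithm.


-- ===== PORT A =====
-- the while-loop over `divisor`; `str(unit) * divisor` is `divisor` concatenated
-- copies of `unit`, i.e. (List.replicate divisor unit).flatten; `int(length/divisor)`
-- is exact integer division n / divisor here since the branch has divisor ∣ length.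
def isMultLoopA (s : List Char) (n divisor : Nat) : Bool :=
  if divisor ≤ n then
    if n % divisor = 0 then
      let index := n / divisor
      let unit := s.take index
      if s = (List.replicate divisor unit).flatten then true
      else isMultLoopA s n (divisor + 1)
    else isMultLoopA s n (divisor + 1)
  else false
termination_by n + 1 - divisor
decreasing_by all_goals omega

def is_multipled (text : String) : Bool :=
  isMultLoopA text.toList text.toList.length 2

-- ===== PORT B =====
-- `len(text) > 0 and text in (text + text)[1:-1]`
def is_multipled_alt (text : String) : Bool :=
  let s := text.toList
  decide (0 < s.length) &&
    PySem.Chars.isIn s (PySem.List.slice (s ++ s) (some 1) (some (-1)))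

-- ===== PRECONDITION & SPEC =====
def Spec_is_multipled (text : String) (out : Bool) : Prop := out = is_multipled_alt text
instance (text : String) (out : Bool) : Decidable (Spec_is_multipled text out) := by unfold Spec_is_multipled; infer_instance

-- ===== CLAIM (what is proved, stated in full; the proofs are below) =====
def Claim_equal_is_multipled : Prop := ∀ (text : String), Dom_is_multipled text → Spec_is_multipled text (is_multipled text)

-- ===== LEMMAS AND PROOFS =====

-- A's loop returns true iff some divisor in [v, n] makes s a repetition.
theorem isMultLoopA_iff (s : List Char) (n v : Nat) :
    isMultLoopA s n v = true ↔
      ∃ d, v ≤ d ∧ d ≤ n ∧ n % d = 0 ∧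
        s = (List.replicate d (s.take (n / d))).flatten := by
  fun_induction isMultLoopA s n v with
  | case1 v hle hmod _ _ heq =>
    simp only [true_iff]
    exact ⟨v, le_refl v, hle, hmod, heq⟩
  | case2 v hle hmod _ _ hne ih =>
    rw [ih]
    constructor
    · rintro ⟨d, hd1, hd2, hd3, hd4⟩; exact ⟨d, by omega, hd2, hd3, hd4⟩
    · rintro ⟨d, hd1, hd2, hd3, hd4⟩
      refine ⟨d, ?_, hd2, hd3, hd4⟩
      rcases Nat.eq_or_lt_of_le hd1 with h | h
      · subst h; exact absurd hd4 hne
      · omega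
  | case3 v hle hmod ih =>
    rw [ih]
    constructor
    · rintro ⟨d, hd1, hd2, hd3, hd4⟩; exact ⟨d, by omega, hd2, hd3, hd4⟩
    · rintro ⟨d, hd1, hd2, hd3, hd4⟩
      refine ⟨d, ?_, hd2, hd3, hd4⟩
      rcases Nat.eq_or_lt_of_le hd1 with h | h
      · subst h; exact absurd hd3 hmod
      · omega
  | case4 v hle =>
    constructor
    · intro h; cases h
    · rintro ⟨d, hd1, hd2, _⟩; omega

theorem len_flatten_replicate (d : Nat) (u : List Char) :
    (List.replicate d u).flatten.length = d * u.length := by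
  induction d with
  | zero => simp
  | succ d ih => simp [List.replicate_succ, ih, Nat.succ_mul]; ring

-- rotation by k ≤ n read off the doubled list
theorem rotate_eq_take_drop_doubled (s : List Char) (k : Nat) (hk : k ≤ s.length) :
    ((s ++ s).drop k).take s.length = s.rotate k := by
  rw [List.rotate_eq_drop_append_take hk, List.drop_append_of_le_length hk,
    List.take_append]
  congr 1
  · exact List.take_of_length_le (by simp [List.length_drop])
  · congr 1; simp [List.length_drop]; omega

theorem rotate_sub (s : List Char) (a b : Nat)
    (ha : s.rotate a = s) (hb : s.rotate b = s) : s.rotate (b - a) = s := by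
  rcases Nat.le_total b a with h | h
  · rw [Nat.sub_eq_zero_of_le h, List.rotate_zero]
  · have : (s.rotate (b - a)).rotate a = s.rotate a := by
      rw [List.rotate_rotate, Nat.sub_add_cancel h, hb, ha]
    exact List.rotate_eq_rotate.mp this

theorem rotate_mod_fix (s : List Char) (a : Nat) (ha : s.rotate a = s) :
    ∀ b, s.rotate b = s → s.rotate (b % a) = s := by
  intro b
  induction b using Nat.strong_induction_on with
  | _ b ih =>
    intro hb
    rcases Nat.eq_zero_or_pos a with h0 | h0
    · simpa [h0] using hb
    rcases Nat.lt_or_ge b a with h | h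
    · rwa [Nat.mod_eq_of_lt h]
    · rw [Nat.mod_eq_sub_mod h]
      exact ih (b - a) (by omega) (rotate_sub s a b ha hb)

-- the set of rotations fixing s is closed under gcd
theorem rotate_gcd (s : List Char) :
    ∀ a b, s.rotate a = s → s.rotate b = s → s.rotate (Nat.gcd a b) = s := by
  intro a
  induction a using Nat.strong_induction_on with
  | _ a ih =>
    intro b ha hb
    rcases Nat.eq_zero_or_pos a with h0 | h0
    · simpa [h0] using hb
    · rw [Nat.gcd_rec]
      exact ih (b % a) (Nat.mod_lt _ h0) a (rotate_mod_fix s a ha b hb) ha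

-- a repetition has a fixed rotation by the unit length
theorem flatten_rotate (s : List Char) (d : Nat) (hd : 0 < d)
    (hs : s = (List.replicate d (s.take (s.length / d))).flatten) :
    s.rotate (s.length / d) = s := by
  set g := s.length / d with hg
  have hgle : g ≤ s.length := Nat.div_le_self _ _
  have hlen : (s.take g).length = g := by simp [List.length_take]; omega
  rw [List.rotate_eq_drop_append_take hgle]
  rcases Nat.exists_eq_add_of_lt hd with ⟨d', hd'⟩
  have hd2 : d = d' + 1 := by omega
  conv_lhs => rw [hs, hd2, List.replicate_succ, List.flatten_cons]
  rw [List.drop_left' hlen, List.take_left' hlen]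
  conv_rhs => rw [hs, hd2, List.replicate_succ', List.flatten_append]
  simp

theorem getElem?_flatten_replicate (u : List Char) :
    ∀ (d i : Nat), i < d * u.length →
      (List.replicate d u).flatten[i]? = u[i % u.length]? := by
  intro d
  induction d with
  | zero => intro i h; omega
  | succ d ih =>
    intro i h
    have e : (List.replicate (d+1) u).flatten = u ++ (List.replicate d u).flatten := by
      rw [List.replicate_succ, List.flatten_cons]
    rw [e]
    rcases Nat.lt_or_ge i u.length with h' | h'
    · rw [List.getElem?_append_left h', Nat.mod_eq_of_lt h']
    · rw [List.getElem?_append_right h', ih (i - u.length) (by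
        have e2 : (d+1)*u.length = d*u.length + u.length := by ring
        omega), Nat.mod_eq_sub_mod h']

theorem shift_getElem (s : List Char) (g : Nat) (hgle : g ≤ s.length)
    (hrot : s.rotate g = s) (i : Nat) (h : i + g < s.length) :
    s[i]? = s[i + g]? := by
  conv_lhs => rw [← hrot, List.rotate_eq_drop_append_take hgle]
  rw [List.getElem?_append_left (by simp [List.length_drop]; omega), List.getElem?_drop]
  congr 1
  omega

theorem mod_getElem (s : List Char) (g : Nat) (hg : 0 < g) (hgle : g ≤ s.length)
    (hrot : s.rotate g = s) :
    ∀ i, i < s.length → s[i]? = s[i % g]? := by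
  intro i
  induction i using Nat.strong_induction_on with
  | _ i ih =>
    intro h
    rcases Nat.lt_or_ge i g with hlt | hge
    · rw [Nat.mod_eq_of_lt hlt]
    · have h1 : (i - g) + g < s.length := by omega
      have h2 := shift_getElem s g hgle hrot (i - g) h1
      rw [Nat.sub_add_cancel hge] at h2
      rw [← h2, ih (i - g) (by omega) (by omega), Nat.mod_eq_sub_mod hge]

-- a fixed rotation by a divisor g makes the list a repetition of its g-prefix
theorem rotate_dvd_eq_flatten (s : List Char) (g : Nat) (hg : 0 < g)
    (hdvd : g ∣ s.length) (hrot : s.rotate g = s) :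
    s = (List.replicate (s.length / g) (s.take g)).flatten := by
  rcases Nat.eq_zero_or_pos s.length with h0 | h0
  · simp [List.eq_nil_of_length_eq_zero h0]
  have hgle : g ≤ s.length := Nat.le_of_dvd h0 hdvd
  have hlen : (s.take g).length = g := by simp [List.length_take]; omega
  apply List.ext_getElem?
  intro i
  by_cases hi : i < s.length
  · rw [getElem?_flatten_replicate (s.take g) (s.length / g) i
      (by rw [hlen, Nat.div_mul_cancel hdvd]; exact hi)]
    rw [hlen, List.getElem?_take_of_lt (Nat.mod_lt _ hg)]
    exact mod_getElem s g hg hgle hrot i hi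
  · rw [List.getElem?_eq_none (by omega), List.getElem?_eq_none (by
      rw [len_flatten_replicate, hlen, Nat.div_mul_cancel hdvd]; omega)]

theorem slice_doubled (s : List Char) (h : 0 < s.length) :
    PySem.List.slice (s++s) (some 1) (some (-1)) = ((s++s).drop 1).take (2*s.length - 2) := by
  simp [PySem.List.slice, PySem.List.clampIdx]
  rw [if_neg (by omega)]
  have h1 : min 1 (s.length + s.length) = 1 := by omega
  rw [h1, List.drop_one]
  rw [← List.drop_one]
  congr 1
  omega

-- B's substring test says exactly: some rotation by k ∈ [1, n-1] fixes s
theorem isIn_doubled_iff (s : List Char) (h0 : 0 < s.length) :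
    PySem.Chars.isIn s (PySem.List.slice (s ++ s) (some 1) (some (-1))) = true ↔
      ∃ k, 1 ≤ k ∧ k < s.length ∧ s.rotate k = s := by
  rw [slice_doubled s h0, ← PySem.Chars.exists_prefix_drop_iff_isIn]
  constructor
  · rintro ⟨j, hpre⟩
    rw [List.drop_take, List.drop_drop] at hpre
    rw [List.prefix_take_iff] at hpre
    obtain ⟨hpre, hlen⟩ := hpre
    refine ⟨1 + j, by omega, by omega, ?_⟩
    have hk : 1 + j ≤ s.length := by omega
    rw [List.prefix_iff_eq_take] at hpre
    rw [← rotate_eq_take_drop_doubled s (1 + j) hk]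
    exact hpre.symm
  · rintro ⟨k, hk1, hk2, hrot⟩
    refine ⟨k - 1, ?_⟩
    rw [List.drop_take, List.drop_drop]
    have he : 1 + (k - 1) = k := by omega
    rw [he, List.prefix_take_iff]
    constructor
    · rw [List.prefix_iff_eq_take, rotate_eq_take_drop_doubled s k (by omega)]
      exact hrot.symm
    · omega

-- divisor witnesses and fixed nontrivial rotations are interchangeable
theorem divisor_iff_rotation (s : List Char) (h0 : 0 < s.length) :
    (∃ d, 2 ≤ d ∧ d ≤ s.length ∧ s.length % d = 0 ∧
        s = (List.replicate d (s.take (s.length / d))).flatten) ↔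
      ∃ k, 1 ≤ k ∧ k < s.length ∧ s.rotate k = s := by
  constructor
  · rintro ⟨d, hd2, hdn, hmod, hper⟩
    refine ⟨s.length / d, ?_, Nat.div_lt_self h0 (by omega), flatten_rotate s d (by omega) hper⟩
    exact (Nat.one_le_div_iff (by omega)).mpr hdn
  · rintro ⟨k, hk1, hk2, hrot⟩
    set g := Nat.gcd k s.length with hgdef
    have hrotg : s.rotate g = s := rotate_gcd s k s.length hrot (List.rotate_length s)
    have hdvd : g ∣ s.length := Nat.gcd_dvd_right _ _
    have hgpos : 0 < g := Nat.gcd_pos_of_pos_left _ (by omega)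
    have hgk : g ≤ k := Nat.le_of_dvd (by omega) (Nat.gcd_dvd_left _ _)
    have hmul : g * (s.length / g) = s.length := Nat.mul_div_cancel' hdvd
    refine ⟨s.length / g, ?_, Nat.div_le_self _ _, ?_, ?_⟩
    · by_contra hlt
      have hle1 : s.length / g ≤ 1 := by omega
      have hlen_le : s.length ≤ g * 1 := by
        calc s.length = g * (s.length / g) := hmul.symm
          _ ≤ g * 1 := Nat.mul_le_mul_left g hle1
      omega
    · exact Nat.mod_eq_zero_of_dvd (Nat.div_dvd_of_dvd hdvd)
    · rw [Nat.div_div_self hdvd (by omega)]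
      exact rotate_dvd_eq_flatten s g hgpos hdvd hrotg

-- ===== VERDICT (by name: the statement is the Claim_ definition above) =====
theorem is_multipled_spec : Claim_equal_is_multipled := by
  intro text _
  show is_multipled text = is_multipled_alt text
  rw [is_multipled, is_multipled_alt]
  set s := text.toList with hs
  rcases Nat.eq_zero_or_pos s.length with h0 | h0
  · have hnil : s = [] := List.eq_nil_of_length_eq_zero h0
    rw [hnil]
    rw [isMultLoopA]
    simp
  · have hb : decide (0 < s.length) = true := by simp [h0]
    rw [hb, Bool.true_and]
    have := (divisor_iff_rotation s h0)
    rw [Bool.eq_iff_iff, isMultLoopA_iff, isIn_doubled_iff s h0]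
    exact this
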